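-- pv_equiv track=rewrite | github.com/krzychusan/TestHard | mydevenv/lib/python2.6/site-packages/WebHelpers-0.6.4-py2.6.egg/webhelpers/containers.py | distribute
-- ===== SOURCE A (Python) =====
-- def distribute(lis, columns, direction, fill=None):
--     """Distribute a list into a N-column table (list of lists).
--
--     ``lis`` is a list of values to distribute.
--
--     ``columns`` is an int greater than 1, specifying the number of columns in
--     the table.
--
--     ``direction`` is a string beginning with "H" (horizontal) or "V"
--     (vertical), case insensitive.  This affects how values are distributed in
--     the table, as described below.
--
--     ``fill`` is a value that will be placed in any remaining cells if the data
--     runs out before the last row or column is completed.  This must be an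
--     immutable value such as ``None`` , ``""``, 0, "&nbsp;", etc.  If you
--     use a mutable value like ``[]`` and later change any cell containing the
--     fill value, all other cells containing the fill value will also be changed.
--
--     The return value is a list of lists, where each sublist represents a row in
--     the table.
--     ``table[0]`` is the first row.
--     ``table[0][0]`` is the first column in the first row.
--     ``table[0][1]`` is the second column in the first row.
--
--     This can be displayed in an HTML table via the following Mako template:
--
--     .. code-block:: html+mako
--
--         <table>
--         % for row in table:
--           <tr>
--         % for cell in row:
--             <td>${cell}</td>
--         % endfor   cell
--           </tr>
--         % endfor   row
--         </table>
--
--     In a horizontal table, each row is filled before going on to the next row.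
--     This is the same as dividing the list into chunks.
--
--     .. code-block:: pycon
--
--         >>> distribute([1, 2, 3, 4, 5, 6, 7, 8], 3, "H")
--         [[1, 2, 3], [4, 5, 6], [7, 8, None]]
--
--     In a vertical table, the first element of each sublist is filled before
--     going on to the second element.  This is useful for displaying an
--     alphabetical list in columns, or when the entire column will be placed in
--     a single <td> with a <br /> between each element.
--
--     .. code-block:: pycon
--
--         >>> food = ["apple", "banana", "carrot", "daikon", "egg", "fish", "gelato", "honey"]
--         >>> table = distribute(food, 3, "V", "")
--         >>> table
--         [['apple', 'daikon', 'gelato'], ['banana', 'egg', 'honey'], ['carrot', 'fish', '']]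
--         >>> for row in table:
--         ...    for item in row:
--         ...         print "%-9s" % item,
--         ...    print "."   # To show where the line ends.
--         ...
--         apple     daikon    gelato    .
--         banana    egg       honey     .
--         carrot    fish                .
--
--     Alternatives to this function include a NumPy matrix of objects.
--
--     """
--     if columns < 1:
--         raise ValueError("arg 'columns' must be >= 1")
--     dir = direction[0].upper()
--     if dir == "H":   # Horizontal table (row-wise)
--         table = []
--         for i in range(0, len(lis), columns):
--             row = lis[i:i+columns]
--             row_len = len(row)
--             if row_len < columns:
--                 extra = [fill] * (columns - row_len)
--                 row.extend(extra)
--             table.append(row)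
--         return table
--     elif dir == "V":  # Vertical table (column-wise)
--         total = len(lis)
--         rows, remainder = divmod(total, columns)
--         if remainder:
--             rows += 1
--         table = [[fill] * columns for x in range(rows)]
--         #print table
--         for i, elm in enumerate(lis):
--             col, row = divmod(i, rows)
--             #print "i=%d, row=%d, col=%d, element=%r" % (i, row, col, elm)
--             table[row][col] = elm
--         return table
--     else:
--         raise ValueError("arg ``direction`` must start with 'H' or 'V'")
-- ===== SOURCE B (Python) =====
-- def distribute(lis, columns, direction, fill=None):
--     """Distribute a list into an N-column table (list of row lists).
--
--     Different decomposition from the original: the horizontal branch pads the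
--     whole list once and chunks it; the vertical branch partitions the list
--     into padded column blocks and reads the table off row by row (a
--     partition-pad-transpose pass) instead of preallocating a grid and
--     scattering elements by divmod.
--     """
--     if columns < 1:
--         raise ValueError("arg 'columns' must be >= 1")
--     d = direction[0].upper()
--     n = len(lis)
--     rows = -(-n // columns)
--     if d == "H":
--         padded = list(lis) + [fill] * (rows * columns - n)
--         return [padded[r * columns:(r + 1) * columns] for r in range(rows)]
--     elif d == "V":
--         cols = [(lis[c * rows:(c + 1) * rows] + [fill] * rows)[:rows]
--                 for c in range(columns)]
--         return [[col[r] for col in cols] for r in range(rows)]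
--     else:
--         raise ValueError("arg ``direction`` must start with 'H' or 'V'")
-- ===== Notes on version B (the rewrite author's own statement) =====
-- stated objective: alternative
-- what changed: The vertical branch replaces A's preallocate-grid-then-scatter-by-divmod loop with a partition-pad-transpose pass (slice the list into padded column blocks and read the table off row by row), and the horizontal branch pads the whole list once and chunks it instead of padding each row inside the loop.
import Mathlib
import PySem

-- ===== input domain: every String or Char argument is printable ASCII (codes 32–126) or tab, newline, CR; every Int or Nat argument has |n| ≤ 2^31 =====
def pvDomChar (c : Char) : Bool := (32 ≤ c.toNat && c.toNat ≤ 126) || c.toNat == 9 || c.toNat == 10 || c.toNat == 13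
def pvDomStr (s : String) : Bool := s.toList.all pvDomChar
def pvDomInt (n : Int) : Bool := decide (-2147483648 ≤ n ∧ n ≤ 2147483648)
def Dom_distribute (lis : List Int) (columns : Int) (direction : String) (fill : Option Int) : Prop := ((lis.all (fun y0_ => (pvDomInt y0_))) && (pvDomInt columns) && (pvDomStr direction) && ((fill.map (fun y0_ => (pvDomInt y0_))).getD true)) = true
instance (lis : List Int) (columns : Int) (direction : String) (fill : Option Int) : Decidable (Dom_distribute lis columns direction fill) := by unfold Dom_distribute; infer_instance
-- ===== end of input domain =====

-- B re-decomposes the table construction: the horizontal branch pads the whole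
-- list once and chunks it; the vertical branch partitions the list into padded
-- column blocks and reads the table off row by row, replacing A's
-- preallocate-grid-and-scatter-by-divmod loop (objective: alternative
-- decomposition, same asymptotic cost). Equivalence is about the return value;
-- neither program mutates its arguments.

-- ===== PORT A =====
-- `table[row][col] = elm` is ported with pyGetD/pySetD (their out-of-range
-- default is never taken: in A row < rows and col < columns always hold);
-- likewise the divmod? `none` arms are unreachable (columns ≥ 1, rows ≥ 1
-- whenever the loop runs).  The `raise` statements return [] — those inputs
-- are excluded by Pre_distribute.
def distribute (lis : List Int) (columns : Int) (direction : String) (fill : Option Int) : List (List (Option Int)) :=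
  if columns < 1 then []
  else
    match PySem.Str.pyGet? direction 0 with
    | none => []
    | some c0 =>
      let dir := PySem.Chars.upperChar c0
      if dir = 'H' then
        (PySem.List.pyRange 0 lis.length columns).foldl (fun table i =>
          let row := (PySem.List.slice lis (some i) (some (i + columns))).map some
          let rowLen : Int := row.length
          let row' := if rowLen < columns then row ++ List.replicate (columns - rowLen).toNat fill else row
          table ++ [row']) []
      else if dir = 'V' then
        match PySem.Int.divmod? (lis.length : Int) columns with
        | none => []
        | some qr =>
          let rows := if qr.2 ≠ 0 then qr.1 + 1 else qr.1
          let table := (PySem.List.pyRange 0 rows 1).map (fun _ => List.replicate columns.toNat fill)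
          (PySem.List.enumerate lis).foldl (fun t p =>
            match PySem.Int.divmod? p.1 rows with
            | none => t
            | some cr =>
              PySem.List.pySetD t cr.2 (PySem.List.pySetD (PySem.List.pyGetD t cr.2 []) cr.1 (some p.2))) table
      else []

-- ===== PORT B =====
-- Port of Source B.  `col[r]` is always in range (each column has length rows), so
-- pyGetD's default is never taken; the `raise` branches return [] and are
-- excluded by Pre_distribute.
def distribute_alt (lis : List Int) (columns : Int) (direction : String) (fill : Option Int) : List (List (Option Int)) :=
  if columns < 1 then []
  else
    match PySem.Str.pyGet? direction 0 with
    | none => []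
    | some c0 =>
      let d := PySem.Chars.upperChar c0
      let n : Int := lis.length
      let rows : Int := -(PySem.Int.floordiv (-n) columns)
      if d = 'H' then
        let padded := lis.map some ++ List.replicate (rows * columns - n).toNat fill
        (PySem.List.pyRange 0 rows 1).map (fun r =>
          PySem.List.slice padded (some (r * columns)) (some ((r + 1) * columns)))
      else if d = 'V' then
        let cols := (PySem.List.pyRange 0 columns 1).map (fun c =>
          PySem.List.slice ((PySem.List.slice lis (some (c * rows)) (some ((c + 1) * rows))).map some
              ++ List.replicate rows.toNat fill) none (some rows))
        (PySem.List.pyRange 0 rows 1).map (fun r => cols.map (fun col => PySem.List.pyGetD col r none))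
      else []

-- ===== PRECONDITION & SPEC =====
-- Pre_ excludes exactly the inputs on which A raises ValueError/IndexError:
-- columns < 1, an empty direction string, or a direction whose first character
-- does not upper-case to 'H' or 'V'.
def Pre_distribute (lis : List Int) (columns : Int) (direction : String) (fill : Option Int) : Prop :=
  1 ≤ columns ∧
    ((PySem.Str.pyGet? direction 0).map
      (fun c => PySem.Chars.upperChar c == 'H' || PySem.Chars.upperChar c == 'V')).getD false = true
instance (lis : List Int) (columns : Int) (direction : String) (fill : Option Int) : Decidable (Pre_distribute lis columns direction fill) := by unfold Pre_distribute; infer_instance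

def pvWitness_distribute : List Int × Int × String × Option Int := ([1, 2, 3, 4, 5], 2, "V", some 7)

def Spec_distribute (lis : List Int) (columns : Int) (direction : String) (fill : Option Int) (out : List (List (Option Int))) : Prop := out = distribute_alt lis columns direction fill
instance (lis : List Int) (columns : Int) (direction : String) (fill : Option Int) (out : List (List (Option Int))) : Decidable (Spec_distribute lis columns direction fill out) := by unfold Spec_distribute; infer_instance

-- ===== CLAIM (what is proved, stated in full; the proofs are below) =====
def Claim_equal_distribute : Prop := ∀ (lis : List Int) (columns : Int) (direction : String) (fill : Option Int), Dom_distribute lis columns direction fill → Pre_distribute lis columns direction fill → Spec_distribute lis columns direction fill (distribute lis columns direction fill)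

-- ===== LEMMAS AND PROOFS =====


def pvCeil (n k : Nat) : Nat := (n + k - 1) / k
theorem pvCeil_eq (n k : Nat) (hk : 0 < k) :
    pvCeil n k = n / k + (if n % k = 0 then 0 else 1) := by
  have hd := Nat.div_add_mod n k
  have hm := Nat.mod_lt n hk
  unfold pvCeil
  by_cases h0 : n % k = 0
  · rw [if_pos h0]
    apply Nat.div_eq_of_lt_le
    · have : (n/k + 0) * k = k * (n/k) := by ring
      omega
    · have : ((n/k + 0) + 1) * k = k * (n/k) + k := by ring
      omega
  · rw [if_neg h0]
    apply Nat.div_eq_of_lt_le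
    · have : (n/k + 1) * k = k * (n/k) + k := by ring
      omega
    · have : ((n/k + 1) + 1) * k = k * (n/k) + k + k := by ring
      omega
theorem pvCeil_le (n k : Nat) (hk : 0 < k) : n ≤ pvCeil n k * k := by
  rw [pvCeil_eq n k hk]
  have hd := Nat.div_add_mod n k
  have hm := Nat.mod_lt n hk
  by_cases h0 : n % k = 0
  · rw [if_pos h0]
    have : (n/k + 0) * k = k * (n/k) := by ring
    omega
  · rw [if_neg h0]
    have : (n/k + 1) * k = k * (n/k) + k := by ring
    omega
theorem pvCeil_lt (n k r : Nat) (hk : 0 < k) (hr : r < pvCeil n k) : r * k < n := by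
  have h1 : r + 1 ≤ pvCeil n k := hr
  have h2 : (r+1) * k ≤ n + k - 1 :=
    (Nat.le_div_iff_mul_le hk (x := r+1) (y := n + k - 1)).mp h1
  have h3 : (r+1) * k = r * k + k := by ring
  have h4 : 0 < n := by
    by_contra h
    have hn : n = 0 := by omega
    subst hn
    have : pvCeil 0 k = 0 := Nat.div_eq_of_lt (by omega)
    omega
  omega
theorem pvGetD_append_replicate (xs : List (Option Int)) (d : Option Int) (m i : Nat) :
    (xs ++ List.replicate m d).getD i d = xs.getD i d := by
  simp only [List.getD_eq_getElem?_getD, List.getElem?_append]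
  by_cases h : i < xs.length
  · simp [h]
  · simp only [if_neg h]
    rw [List.getElem?_replicate]
    by_cases h2 : i - xs.length < m <;> simp [h2, List.getElem?_eq_none (by omega : xs.length ≤ i)]
theorem pvRow_eq (xs : List (Option Int)) (d : Option Int) (a k : Nat) :
    ((xs.drop a).take k) ++ List.replicate (k - ((xs.drop a).take k).length) d
      = (List.range k).map (fun c => xs.getD (a + c) d) := by
  apply List.ext_getElem
  · simp
  · intro i h1 h2
    simp only [List.length_append, List.length_take, List.length_drop, List.length_replicate] at h1
    have hik : i < k := by omega
    rw [List.getElem_map, List.getElem_range, List.getElem_append]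
    by_cases h : i < ((xs.drop a).take k).length
    · rw [dif_pos h]
      simp only [List.length_take, List.length_drop] at h
      rw [List.getElem_take, List.getElem_drop]
      rw [List.getD_eq_getElem?_getD, List.getElem?_eq_getElem (by omega), Option.getD_some]
    · rw [dif_neg h]
      simp only [List.length_take, List.length_drop] at h
      rw [List.getElem_replicate]
      rw [List.getD_eq_getElem?_getD, List.getElem?_eq_none (by omega), Option.getD_none]
theorem pvChunk_eq (xs : List (Option Int)) (d : Option Int) (a k : Nat) (h : a + k ≤ xs.length) :
    (xs.drop a).take k = (List.range k).map (fun c => xs.getD (a + c) d) := by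
  apply List.ext_getElem
  · simp; omega
  · intro i h1 h2
    simp only [List.length_take, List.length_drop] at h1
    rw [List.getElem_map, List.getElem_range, List.getElem_take, List.getElem_drop]
    rw [List.getD_eq_getElem?_getD, List.getElem?_eq_getElem (by omega), Option.getD_some]
theorem pvTake_append_replicate (xs : List (Option Int)) (d : Option Int) (m : Nat)
    (h : xs.length ≤ m) :
    (xs ++ List.replicate m d).take m = xs ++ List.replicate (m - xs.length) d := by
  rw [List.take_append, List.take_of_length_le h, List.take_replicate]
  congr 1
  rw [Nat.min_eq_left (by omega)]

def pvGrid (ms : List (Option Int)) (fill : Option Int) (R k : Nat) (f : Nat → Nat → Nat) : List (List (Option Int)) :=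
  (List.range R).map (fun r => (List.range k).map (fun c => ms.getD (f r c) fill))

-- A's horizontal loop builds the row-major grid
theorem pvHA (lis : List Int) (fill : Option Int) (k : Nat) (hk : 0 < k) :
    ((PySem.List.pyRange 0 (lis.length : Int) (k : Int)).foldl (fun table i =>
      let row := (PySem.List.slice lis (some i) (some (i + (k : Int)))).map some
      let rowLen : Int := row.length
      let row' := if rowLen < (k : Int) then row ++ List.replicate ((k : Int) - rowLen).toNat fill else row
      table ++ [row']) [])
    = pvGrid (lis.map some) fill (pvCeil lis.length k) k (fun r c => r * k + c) := by
  have hk' : (0:Int) < (k:Int) := by exact_mod_cast hk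
  rw [PySem.List.pyRange_of_pos 0 (lis.length : Int) hk']
  rw [PySem.List.foldl_append_singleton_eq_map
    (f := fun i =>
      let row := (PySem.List.slice lis (some i) (some (i + (k : Int)))).map some
      let rowLen : Int := row.length
      if rowLen < (k : Int) then row ++ List.replicate ((k : Int) - rowLen).toNat fill else row)]
  rw [List.nil_append, List.map_map]
  have hcnt : (if (0:Int) < (lis.length : Int) then (((lis.length : Int) - 0 + k - 1) / k).toNat else 0)
      = pvCeil lis.length k := by
    by_cases hn : (0:Int) < (lis.length : Int)
    · rw [if_pos hn]
      have : ((lis.length : Int) - 0 + k - 1) = ((lis.length + k - 1 : Nat) : Int) := by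
        omega
      rw [this]
      have : (((lis.length + k - 1 : Nat) : Int) / (k : Int)) = (((lis.length + k - 1) / k : Nat) : Int) := by
        exact_mod_cast rfl
      rw [this, Int.toNat_natCast]
      rfl
    · rw [if_neg hn]
      have hn0 : lis.length = 0 := by omega
      rw [hn0]
      show 0 = pvCeil 0 k
      unfold pvCeil
      rw [Nat.div_eq_of_lt (by omega)]
  rw [hcnt]
  unfold pvGrid
  apply List.map_congr_left
  intro r hr
  rw [List.mem_range] at hr
  simp only [Function.comp_apply]
  have hi : (0 : Int) + (k : Int) * (r : Int) = ((r * k : Nat) : Int) := by push_cast; ring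
  rw [hi]
  have hi2 : ((r * k : Nat) : Int) + (k : Int) = ((r * k : Nat) : Int) + ((k : Nat) : Int) := rfl
  rw [hi2, PySem.List.slice_natCast_add]
  rw [List.map_take, List.map_drop]
  set ms := lis.map some with hms
  set t := (((ms.drop (r * k)).take k)).length with ht
  have htk : t ≤ k := by
    rw [ht]
    simp
  by_cases hc : (t : Int) < (k : Int)
  · rw [if_pos (by exact_mod_cast hc)]
    have : ((k : Int) - (t : Int)).toNat = k - t := by omega
    rw [this, ht, pvRow_eq]
  · rw [if_neg (by exact_mod_cast hc)]
    have htk' : t = k := by omega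
    have : ((ms.drop (r*k)).take k) = ((ms.drop (r*k)).take k) ++ List.replicate (k - t) fill := by
      rw [htk', Nat.sub_self, List.replicate_zero, List.append_nil]
    rw [this, ht, pvRow_eq]

theorem pvRowsB (n k : Nat) (hk : 0 < k) :
    -(PySem.Int.floordiv (-(n:Int)) (k:Int)) = ((pvCeil n k : Nat) : Int) := by
  rw [PySem.Int.neg_floordiv_neg_eq_iff_of_pos (by exact_mod_cast hk : (0:Int) < (k:Int))]
  constructor
  · rcases Nat.eq_zero_or_pos (pvCeil n k) with hR | hR
    · rw [hR]
      push_cast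
      omega
    · have h1 := pvCeil_lt n k (pvCeil n k - 1) hk (by omega)
      have h2 : ((pvCeil n k : Nat) : Int) - 1 = (((pvCeil n k - 1 : Nat)) : Int) := by omega
      rw [h2]
      exact_mod_cast h1
  · exact_mod_cast pvCeil_le n k hk

theorem pvDivmodIff (m R r c : Nat) (hR : 0 < R) (hr : r < R) :
    c * R + r = m ↔ (c = m / R ∧ r = m % R) := by
  constructor
  · rintro rfl
    constructor
    · rw [show c * R + r = R * c + r by ring, Nat.mul_add_div hR, Nat.div_eq_of_lt hr, Nat.add_zero]
    · rw [show c * R + r = R * c + r by ring, Nat.mul_add_mod, Nat.mod_eq_of_lt hr]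
  · rintro ⟨rfl, rfl⟩
    have h1 := Nat.div_add_mod m R
    have h2 : m / R * R = R * (m / R) := Nat.mul_comm _ _
    omega

theorem pvTake_succ_getD (xs : List (Option Int)) (d : Option Int) (m i : Nat) (hm : m < xs.length) :
    (xs.take (m+1)).getD i d = if i = m then xs[m] else (xs.take m).getD i d := by
  simp only [List.getD_eq_getElem?_getD, List.getElem?_take]
  by_cases h : i = m
  · subst h
    rw [if_pos (by omega), if_pos rfl, List.getElem?_eq_getElem hm, Option.getD_some]
  · rw [if_neg h]
    by_cases h2 : i < m
    · rw [if_pos (by omega), if_pos h2]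
    · rw [if_neg (by omega), if_neg h2]

def pvGridV (lis : List Int) (fill : Option Int) (R k m : Nat) : List (List (Option Int)) :=
  (List.range R).map (fun r => (List.range k).map (fun c => ((lis.map some).take m).getD (c * R + r) fill))

theorem pvStep (lis : List Int) (fill : Option Int) (R k m : Nat)
    (hm : m < lis.length) (hR : 0 < R) :
    PySem.List.pySetD (pvGridV lis fill R k m) ((m % R : Nat) : Int)
      (PySem.List.pySetD (PySem.List.pyGetD (pvGridV lis fill R k m) ((m % R : Nat) : Int) [])
        ((m / R : Nat) : Int) (some lis[m]))
    = pvGridV lis fill R k (m+1) := by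
  have hms : m < (lis.map some).length := by simpa using hm
  rw [PySem.List.pySetD_natCast, PySem.List.pySetD_natCast, PySem.List.pyGetD_natCast]
  have hrowlt : m % R < R := Nat.mod_lt m hR
  unfold pvGridV
  rw [PySem.List.getD_map_range _ R (m % R) [] hrowlt]
  apply List.ext_getElem
  · simp
  · intro r hr1 hr2
    have hrR : r < R := by simpa using hr2
    rw [List.getElem_set]
    simp only [List.getElem_map, List.getElem_range]
    by_cases hrm : m % R = r
    · rw [if_pos hrm]
      subst hrm
      apply List.ext_getElem
      · simp
      · intro c hc1 hc2
        have hck : c < k := by simpa using hc2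
        rw [List.getElem_set]
        simp only [List.getElem_map, List.getElem_range]
        rw [pvTake_succ_getD _ _ _ _ hms]
        by_cases hcm : m / R = c
        · rw [if_pos hcm]
          have hidx : c * R + m % R = m :=
            (pvDivmodIff m R (m % R) c hR (Nat.mod_lt m hR)).mpr ⟨hcm.symm, rfl⟩
          rw [if_pos hidx, List.getElem_map]
        · rw [if_neg hcm]
          have hidx : ¬ (c * R + m % R = m) := by
            intro h
            exact hcm ((pvDivmodIff m R (m % R) c hR (Nat.mod_lt m hR)).mp h).1.symm
          rw [if_neg hidx]
    · rw [if_neg hrm]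
      apply List.map_congr_left
      intro c hc
      rw [pvTake_succ_getD _ _ _ _ hms]
      have hidx : ¬ (c * R + r = m) := by
        intro h
        exact hrm ((pvDivmodIff m R r c hR hrR).mp h).2.symm
      rw [if_neg hidx]

theorem pvScatter (lis : List Int) (fill : Option Int) (R k : Nat) (hn : lis.length ≤ R * k) :
    ∀ (j m : Nat), lis.length - m ≤ j → m ≤ lis.length →
    (PySem.List.enumerate (lis.drop m) (m : Int)).foldl (fun t p =>
       match PySem.Int.divmod? p.1 ((R : Nat) : Int) with
       | none => t
       | some cr => PySem.List.pySetD t cr.2 (PySem.List.pySetD (PySem.List.pyGetD t cr.2 []) cr.1 (some p.2)))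
      (pvGridV lis fill R k m)
    = pvGridV lis fill R k lis.length := by
  intro j
  induction j with
  | zero =>
    intro m hj hm
    have hme : m = lis.length := by omega
    subst hme
    rw [List.drop_length, PySem.List.enumerate_nil, List.foldl_nil]
  | succ j ih =>
    intro m hj hm
    by_cases hme : m = lis.length
    · subst hme
      rw [List.drop_length, PySem.List.enumerate_nil, List.foldl_nil]
    · have hmlt : m < lis.length := by omega
      have hR : 0 < R := by
        rcases Nat.eq_zero_or_pos R with h | h
        · exfalso
          rw [h, Nat.zero_mul] at hn
          omega
        · exact h
      rw [List.drop_eq_getElem_cons hmlt, PySem.List.enumerate_cons, List.foldl_cons]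
      have hdm : PySem.Int.divmod? ((m : Nat) : Int) ((R : Nat) : Int)
          = some (((m / R : Nat) : Int), ((m % R : Nat) : Int)) := by
        have h1 : ((m : Nat) : Int).fdiv ((R : Nat) : Int) = ((m / R : Nat) : Int) :=
          PySem.Int.floordiv_natCast m R
        have h2 : ((m : Nat) : Int).fmod ((R : Nat) : Int) = ((m % R : Nat) : Int) :=
          PySem.Int.mod_natCast m R
        simp [PySem.Int.divmod?, h1, h2, hR.ne']
      simp only [hdm]
      rw [pvStep lis fill R k m hmlt hR]
      have : ((m : Int) + 1) = (((m+1 : Nat)) : Int) := by push_cast; ring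
      rw [this]
      exact ih (m+1) (by omega) (by omega)

-- B's horizontal branch builds the same row-major grid
theorem pvHB (lis : List Int) (fill : Option Int) (k : Nat) (hk : 0 < k) :
    (List.map (fun r =>
        PySem.List.slice
          (List.map some lis ++
            List.replicate ((((pvCeil lis.length k : Nat) : Int)) * (k : Int) - (lis.length : Int)).toNat fill)
          (some (r * (k : Int))) (some ((r + 1) * (k : Int))))
      (PySem.List.pyRange 0 ((pvCeil lis.length k : Nat) : Int) 1))
    = pvGrid (lis.map some) fill (pvCeil lis.length k) k (fun r c => r * k + c) := by
  set R := pvCeil lis.length k with hR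
  have hnle : lis.length ≤ R * k := pvCeil_le lis.length k hk
  have hpad : (((R : Nat) : Int) * (k : Int) - (lis.length : Int)).toNat = R * k - lis.length := by
    have : ((R : Nat) : Int) * (k : Int) = ((R * k : Nat) : Int) := by push_cast; ring
    omega
  rw [hpad, PySem.List.pyRange_one, List.map_map]
  rw [show ((R:Nat):Int) - 0 = ((R:Nat):Int) by ring, Int.toNat_natCast]
  unfold pvGrid
  apply List.map_congr_left
  intro r hr
  rw [List.mem_range] at hr
  simp only [Function.comp_apply]
  have hlen : (List.map some lis ++ List.replicate (R * k - lis.length) fill).length = R * k := by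
    simp
    omega
  have hi1 : (0 + (r:Int)) * (k:Int) = ((r * k : Nat) : Int) := by push_cast; ring
  have hi2 : (0 + (r:Int) + 1) * (k:Int) = ((r * k : Nat) : Int) + ((k : Nat) : Int) := by push_cast; ring
  rw [hi1, hi2, PySem.List.slice_natCast_add]
  rw [pvChunk_eq _ fill _ _ (by rw [hlen]; calc r * k + k = (r+1) * k := by ring
        _ ≤ R * k := Nat.mul_le_mul_right k (by omega))]
  apply List.map_congr_left
  intro c hc
  exact pvGetD_append_replicate _ _ _ _

-- B's vertical branch builds the column-major grid
theorem pvVB (lis : List Int) (fill : Option Int) (k : Nat) :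
    (List.map (fun r =>
        List.map (fun col => PySem.List.pyGetD col r none)
          (List.map (fun c =>
              PySem.List.slice
                (List.map some
                    (PySem.List.slice lis (some (c * ((pvCeil lis.length k : Nat) : Int)))
                      (some ((c + 1) * ((pvCeil lis.length k : Nat) : Int)))) ++
                  List.replicate ((pvCeil lis.length k : Nat) : Int).toNat fill)
                none (some ((pvCeil lis.length k : Nat) : Int)))
            (PySem.List.pyRange 0 (k : Int) 1)))
      (PySem.List.pyRange 0 ((pvCeil lis.length k : Nat) : Int) 1))
    = pvGrid (lis.map some) fill (pvCeil lis.length k) k (fun r c => c * (pvCeil lis.length k) + r) := by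
  set R := pvCeil lis.length k with hRdef
  have hcols : (List.map (fun c =>
              PySem.List.slice
                (List.map some
                    (PySem.List.slice lis (some (c * ((R : Nat) : Int)))
                      (some ((c + 1) * ((R : Nat) : Int)))) ++
                  List.replicate ((R : Nat) : Int).toNat fill)
                none (some ((R : Nat) : Int)))
            (PySem.List.pyRange 0 (k : Int) 1))
      = List.map (fun c => List.map (fun r => (lis.map some).getD (c * R + r) fill) (List.range R))
          (List.range k) := by
    rw [PySem.List.pyRange_one, List.map_map]
    rw [show (k:Int) - 0 = (k:Int) by ring, Int.toNat_natCast]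
    apply List.map_congr_left
    intro c hc
    rw [List.mem_range] at hc
    simp only [Function.comp_apply]
    have hi1 : (0 + (c:Int)) * ((R : Nat) : Int) = ((c * R : Nat) : Int) := by push_cast; ring
    have hi2 : (0 + (c:Int) + 1) * ((R : Nat) : Int) = ((c * R : Nat) : Int) + ((R : Nat) : Int) := by
      push_cast; ring
    rw [hi1, hi2, PySem.List.slice_natCast_add, PySem.List.slice_to_natCast]
    rw [List.map_take, List.map_drop]
    rw [pvTake_append_replicate _ _ _ (by simp)]
    rw [pvRow_eq]
  rw [hcols, PySem.List.pyRange_one, List.map_map]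
  rw [show ((R:Nat):Int) - 0 = ((R:Nat):Int) by ring, Int.toNat_natCast]
  unfold pvGrid
  apply List.map_congr_left
  intro r hr
  rw [List.mem_range] at hr
  simp only [Function.comp_apply, List.map_map]
  apply List.map_congr_left
  intro c hc
  rw [List.mem_range] at hc
  simp only [Function.comp_apply]
  rw [show (0 + (r:Int)) = ((r : Nat) : Int) by ring]
  rw [PySem.List.pyGetD_natCast, PySem.List.getD_map_range _ R r none hr]

-- A's vertical branch: scatter loop lands in the same column-major grid
theorem pvVA (lis : List Int) (fill : Option Int) (R k : Nat)
    (hn : lis.length ≤ R * k) :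
    (List.foldl (fun t p =>
        match PySem.Int.divmod? p.1 ((R : Nat) : Int) with
        | none => t
        | some cr => PySem.List.pySetD t cr.2 (PySem.List.pySetD (PySem.List.pyGetD t cr.2 []) cr.1 (some p.2)))
      (List.map (fun _ => List.replicate ((k : Int)).toNat fill) (PySem.List.pyRange 0 ((R : Nat) : Int) 1))
      (PySem.List.enumerate lis))
    = pvGrid (lis.map some) fill R k (fun r c => c * R + r) := by
  have hinit : (List.map (fun _ => List.replicate ((k : Int)).toNat fill)
        (PySem.List.pyRange 0 ((R : Nat) : Int) 1)) = pvGridV lis fill R k 0 := by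
    rw [PySem.List.pyRange_one, List.map_map]
    rw [show ((R:Nat):Int) - 0 = ((R:Nat):Int) by ring, Int.toNat_natCast]
    unfold pvGridV
    apply List.map_congr_left
    intro r hr
    simp only [Function.comp_apply, List.take_zero, List.getD_nil]
    rw [List.map_const', List.length_range]
  rw [hinit]
  have h0 : (PySem.List.enumerate lis 0) = (PySem.List.enumerate (lis.drop 0) ((0 : Nat) : Int)) := by
    rw [List.drop_zero]
    rfl
  rw [h0]
  rw [pvScatter lis fill R k hn (lis.length) 0 (by omega) (by omega)]
  unfold pvGridV pvGrid
  rw [show List.take lis.length (List.map some lis) = List.map some lis by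
    exact List.take_of_length_le (by simp)]


theorem pvRowsIf (n k : Nat) (hk : 0 < k) :
    (if ((n % k : Nat) : Int) ≠ 0 then ((n / k : Nat) : Int) + 1 else ((n / k : Nat) : Int))
      = ((pvCeil n k : Nat) : Int) := by
  by_cases h : n % k = 0
  · rw [if_neg (by simp [h]), pvCeil_eq n k hk, if_pos h]
    push_cast
    ring
  · rw [if_pos (by exact_mod_cast h), pvCeil_eq n k hk, if_neg h]
    push_cast
    ring

-- ===== VERDICT (by name: the statement is the Claim_ definition above) =====
theorem distribute_spec : Claim_equal_distribute := by
  intro lis columns direction fill hdom hpre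
  unfold Spec_distribute
  obtain ⟨hc, hd⟩ := hpre
  obtain ⟨k, rfl⟩ : ∃ k : Nat, columns = (k : Int) :=
    ⟨columns.toNat, (Int.toNat_of_nonneg (by omega)).symm⟩
  have hk : 0 < k := by exact_mod_cast hc
  have hnlt : ¬ ((k : Int) < 1) := by omega
  cases h0 : PySem.Str.pyGet? direction 0 with
  | none =>
    rw [h0] at hd
    simp at hd
  | some c =>
    rw [h0] at hd
    simp only [Option.map_some, Option.getD_some, Bool.or_eq_true, beq_iff_eq] at hd
    have hdm : PySem.Int.divmod? ((lis.length : Nat) : Int) ((k : Nat) : Int)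
        = some (((lis.length / k : Nat) : Int), ((lis.length % k : Nat) : Int)) := by
      have h1 : ((lis.length : Nat) : Int).fdiv ((k : Nat) : Int) = ((lis.length / k : Nat) : Int) :=
        PySem.Int.floordiv_natCast lis.length k
      have h2 : ((lis.length : Nat) : Int).fmod ((k : Nat) : Int) = ((lis.length % k : Nat) : Int) :=
        PySem.Int.mod_natCast lis.length k
      simp [PySem.Int.divmod?, h1, h2, hk.ne']
    rcases hd with hH | hV
    · simp only [distribute, distribute_alt, if_neg hnlt, h0, if_pos hH]
      rw [pvRowsB lis.length k hk]
      exact (pvHA lis fill k hk).trans (pvHB lis fill k hk).symm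
    · by_cases hH : PySem.Chars.upperChar c = 'H'
      · simp only [distribute, distribute_alt, if_neg hnlt, h0, if_pos hH]
        rw [pvRowsB lis.length k hk]
        exact (pvHA lis fill k hk).trans (pvHB lis fill k hk).symm
      · simp only [distribute, distribute_alt, if_neg hnlt, h0, if_neg hH, if_pos hV]
        rw [pvRowsB lis.length k hk, hdm]
        simp only [ne_eq]
        rw [show (if ¬((lis.length % k : Nat) : Int) = 0 then ((lis.length / k : Nat) : Int) + 1
              else ((lis.length / k : Nat) : Int)) = ((pvCeil lis.length k : Nat) : Int) by
            rw [← pvRowsIf lis.length k hk]]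
        exact (pvVA lis fill (pvCeil lis.length k) k (pvCeil_le lis.length k hk)).trans
          (pvVB lis fill k).symm
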